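-- pv_equiv track=rewrite | github.com/sczfaker/dota2_data_analyze | dotadata_deepkeras.py | make_samples
-- ===== SOURCE A (Python) =====
-- def make_samples(x_input,y_input):
--     train_x = []
--     train_y = []
--     test_x = []
--     test_y = []
--     validate_x = []
--     validate_y = []
--     for i in range(len(x_input)):
--         if i%10==8:
--             test_x.append(x_input[i])
--             test_y.append(y_input[i])
--         elif i%10==9:
--             validate_x.append(x_input[i])
--             validate_y.append(y_input[i])
--         else:
--             train_x.append(x_input[i])
--             train_y.append(y_input[i])
--     return train_x,train_y,test_x,test_y,validate_x,validate_y
-- ===== SOURCE B (Python) =====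
-- def make_samples(x_input, y_input):
--     n = len(x_input)
--     train_i = [i for i in range(n) if i % 10 < 8]
--     test_i = range(8, n, 10)
--     validate_i = range(9, n, 10)
--     return ([x_input[i] for i in train_i], [y_input[i] for i in train_i],
--             [x_input[i] for i in test_i], [y_input[i] for i in test_i],
--             [x_input[i] for i in validate_i], [y_input[i] for i in validate_i])
-- ===== Notes on version B (the rewrite author's own statement) =====
-- stated objective: simpler
-- what changed: Replaces the single branching loop appending to six accumulators by first computing the three index sets (strided ranges for test/validate, one filtered range for train) and then selecting from x_input and y_input by six indexed comprehensions.
import Mathlib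
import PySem

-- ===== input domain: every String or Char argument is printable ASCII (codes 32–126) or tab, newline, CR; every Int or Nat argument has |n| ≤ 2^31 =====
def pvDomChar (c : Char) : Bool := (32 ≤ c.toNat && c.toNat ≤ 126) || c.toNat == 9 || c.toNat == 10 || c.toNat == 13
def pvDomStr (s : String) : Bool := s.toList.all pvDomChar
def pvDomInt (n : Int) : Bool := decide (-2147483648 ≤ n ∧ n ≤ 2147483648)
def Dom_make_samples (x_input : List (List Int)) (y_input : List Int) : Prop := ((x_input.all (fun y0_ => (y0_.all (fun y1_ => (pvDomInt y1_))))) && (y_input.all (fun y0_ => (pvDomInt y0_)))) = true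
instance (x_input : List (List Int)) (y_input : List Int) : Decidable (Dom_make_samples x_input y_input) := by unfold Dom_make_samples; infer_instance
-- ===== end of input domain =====

-- B restructures A's single branching loop into: compute the three index sets (two strided ranges, one filtered range), then six indexed selections (objective: simpler).
-- ===== PORT A =====
def make_samples (x_input : List (List Int)) (y_input : List Int) : List (List Int) × List Int × List (List Int) × List Int × List (List Int) × List Int :=
  (PySem.List.pyRange 0 (PySem.List.len x_input) 1).foldl
    (fun st i =>
      let (tx, ty, sx, sy, vx, vy) := st
      if PySem.Int.mod i 10 = 8 then
        (tx, ty, sx ++ [PySem.List.pyGetD x_input i []], sy ++ [PySem.List.pyGetD y_input i 0], vx, vy)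
      else if PySem.Int.mod i 10 = 9 then
        (tx, ty, sx, sy, vx ++ [PySem.List.pyGetD x_input i []], vy ++ [PySem.List.pyGetD y_input i 0])
      else
        (tx ++ [PySem.List.pyGetD x_input i []], ty ++ [PySem.List.pyGetD y_input i 0], sx, sy, vx, vy))
    ([], [], [], [], [], [])

-- ===== PORT B =====
def make_samples_alt (x_input : List (List Int)) (y_input : List Int) : List (List Int) × List Int × List (List Int) × List Int × List (List Int) × List Int :=
  let n := PySem.List.len x_input
  let train_i := (PySem.List.pyRange 0 n 1).filter (fun i => decide (PySem.Int.mod i 10 < 8))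
  let test_i := PySem.List.pyRange 8 n 10
  let validate_i := PySem.List.pyRange 9 n 10
  (train_i.map (fun i => PySem.List.pyGetD x_input i []),
   train_i.map (fun i => PySem.List.pyGetD y_input i 0),
   test_i.map (fun i => PySem.List.pyGetD x_input i []),
   test_i.map (fun i => PySem.List.pyGetD y_input i 0),
   validate_i.map (fun i => PySem.List.pyGetD x_input i []),
   validate_i.map (fun i => PySem.List.pyGetD y_input i 0))

-- ===== PRECONDITION & SPEC =====
-- Pre_ excludes exactly the inputs where the Python A raises IndexError: y_input shorter than x_input.
def Pre_make_samples (x_input : List (List Int)) (y_input : List Int) : Prop :=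
  x_input.length ≤ y_input.length
instance (x_input : List (List Int)) (y_input : List Int) : Decidable (Pre_make_samples x_input y_input) := by unfold Pre_make_samples; infer_instance
def pvWitness_make_samples : List (List Int) × List Int := ([[1], [2]], [3, 4])

def Spec_make_samples (x_input : List (List Int)) (y_input : List Int) (out : List (List Int) × List Int × List (List Int) × List Int × List (List Int) × List Int) : Prop := out = make_samples_alt x_input y_input
instance (x_input : List (List Int)) (y_input : List Int) (out : List (List Int) × List Int × List (List Int) × List Int × List (List Int) × List Int) : Decidable (Spec_make_samples x_input y_input out) := by unfold Spec_make_samples; exact instDecidableEqProd out (make_samples_alt x_input y_input)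

-- ===== CLAIM (what is proved, stated in full; the proofs are below) =====
def Claim_equal_make_samples : Prop := ∀ (x_input : List (List Int)) (y_input : List Int), Dom_make_samples x_input y_input → Pre_make_samples x_input y_input → Spec_make_samples x_input y_input (make_samples x_input y_input)

-- ===== LEMMAS AND PROOFS =====

-- counting lemma: the indices below n congruent to r (r < 10) are r, r+10, ...
theorem filter_range_mod (n r : Nat) (hr : r < 10) :
    (List.range n).filter (fun k => decide (k % 10 = r)) =
      (List.range ((n + 9 - r) / 10)).map (fun k => r + 10 * k) := by
  induction n with
  | zero => simp; omega
  | succ n ih =>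
    rw [List.range_succ, List.filter_append, ih]
    by_cases h : n % 10 = r
    · have h1 : (n + 1 + 9 - r) / 10 = (n + 9 - r) / 10 + 1 := by omega
      have h2 : r + 10 * ((n + 9 - r) / 10) = n := by omega
      rw [h1, List.range_succ, List.map_append]
      simp [h, h2]
    · have h1 : (n + 1 + 9 - r) / 10 = (n + 9 - r) / 10 := by omega
      simp [h, h1]

-- the six accumulators of A's loop, characterised as filter-maps of the index list
theorem loopA (m : Int → Int) (l : List Int) (gx : Int → List Int) (gy : Int → Int)
    (tx : List (List Int)) (ty : List Int) (sx : List (List Int)) (sy : List Int)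
    (vx : List (List Int)) (vy : List Int) :
    l.foldl
      (fun st i =>
        let (tx, ty, sx, sy, vx, vy) := st
        if m i = 8 then
          (tx, ty, sx ++ [gx i], sy ++ [gy i], vx, vy)
        else if m i = 9 then
          (tx, ty, sx, sy, vx ++ [gx i], vy ++ [gy i])
        else
          (tx ++ [gx i], ty ++ [gy i], sx, sy, vx, vy))
      (tx, ty, sx, sy, vx, vy) =
    (tx ++ ((l.filter (fun i => decide (¬ m i = 8 ∧ ¬ m i = 9))).map gx),
     ty ++ ((l.filter (fun i => decide (¬ m i = 8 ∧ ¬ m i = 9))).map gy),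
     sx ++ ((l.filter (fun i => decide (m i = 8))).map gx),
     sy ++ ((l.filter (fun i => decide (m i = 8))).map gy),
     vx ++ ((l.filter (fun i => decide (¬ m i = 8 ∧ m i = 9))).map gx),
     vy ++ ((l.filter (fun i => decide (¬ m i = 8 ∧ m i = 9))).map gy)) := by
  induction l generalizing tx ty sx sy vx vy with
  | nil => simp
  | cons a l ih =>
    simp only [List.foldl_cons, List.filter_cons]
    by_cases h8 : m a = 8
    · simp [h8, ih, List.append_assoc]
    · by_cases h9 : m a = 9
      · simp [h9, ih, List.append_assoc]
      · simp [h8, h9, ih, List.append_assoc]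

-- transfer a filter-map over pyRange 0 n 1 to one over List.range n
theorem rangeFilterMap {γ : Type} (n : Nat) (q : Int → Bool) (p : Nat → Bool)
    (g : Int → γ) (f : Nat → γ)
    (hpq : ∀ k, k < n → q (k : Int) = p k) (hgf : ∀ k, k < n → g (k : Int) = f k) :
    ((PySem.List.pyRange 0 (n : Int) 1).filter q).map g = ((List.range n).filter p).map f := by
  rw [PySem.List.pyRange_one]
  have hn : ((n : Int) - 0).toNat = n := by omega
  rw [hn, List.filter_map, List.map_map]
  rw [List.filter_congr (fun k hk => by
    simp only [Function.comp, zero_add]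
    exact hpq k (List.mem_range.mp hk))]
  exact List.map_congr_left (fun k hk => by
    simp only [Function.comp, zero_add]
    exact hgf k (List.mem_range.mp (List.mem_filter.mp hk).1))

-- a strided range map range(r, n, 10) (r < 10) is the selection at the indices ≡ r mod 10
theorem strideSel {γ : Type} (n r : Nat) (hr : r < 10) (g : Int → γ) (f : Nat → γ)
    (hgf : ∀ k, k < n → g (k : Int) = f k) :
    (PySem.List.pyRange (r : Int) (n : Int) 10).map g =
      ((List.range n).filter (fun k => decide (k % 10 = r))).map f := by
  rw [PySem.List.pyRange_of_pos _ _ (by norm_num : (0:Int) < 10),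
    filter_range_mod n r hr, List.map_map, List.map_map]
  have hcnt : (if (r : Int) < (n : Int) then (((n : Int) - r + 10 - 1) / 10).toNat else 0)
      = (n + 9 - r) / 10 := by
    split_ifs with h
    · omega
    · omega
  rw [hcnt]
  apply List.map_congr_left
  intro k hk
  have hk' : k < (n + 9 - r) / 10 := List.mem_range.mp hk
  have hlt : r + 10 * k < n := by omega
  have hc : (r : Int) + 10 * (k : Int) = ((r + 10 * k : Nat) : Int) := by push_cast; ring
  simp only [Function.comp, hc]
  exact hgf _ hlt

-- Int floor-mod of a Nat cast
theorem modcast (k : Nat) : PySem.Int.mod (k : Int) 10 = ((k % 10 : Nat) : Int) := by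
  simp [PySem.Int.mod, Int.fmod_eq_emod]

-- both ports equal the same sextuple of filter-maps over List.range x.length
theorem A_eq (x : List (List Int)) (y : List Int) :
    make_samples x y =
      (((List.range x.length).filter (fun k => decide (k % 10 < 8))).map (fun k => x.getD k []),
       ((List.range x.length).filter (fun k => decide (k % 10 < 8))).map (fun k => y.getD k 0),
       ((List.range x.length).filter (fun k => decide (k % 10 = 8))).map (fun k => x.getD k []),
       ((List.range x.length).filter (fun k => decide (k % 10 = 8))).map (fun k => y.getD k 0),
       ((List.range x.length).filter (fun k => decide (k % 10 = 9))).map (fun k => x.getD k []),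
       ((List.range x.length).filter (fun k => decide (k % 10 = 9))).map (fun k => y.getD k 0)) := by
  unfold make_samples
  rw [PySem.List.len_eq, loopA (fun i => PySem.Int.mod i 10)]
  simp only [List.nil_append]
  have hgx : ∀ k, k < x.length → (fun i => PySem.List.pyGetD x i []) (k : Int) = (fun k => x.getD k []) k := by
    intro k _; simp [PySem.List.pyGetD_natCast]
  have hgy : ∀ k, k < x.length → (fun i => PySem.List.pyGetD y i 0) (k : Int) = (fun k => y.getD k 0) k := by
    intro k _; simp [PySem.List.pyGetD_natCast]
  refine congrArg₂ _ ?_ (congrArg₂ _ ?_ (congrArg₂ _ ?_ (congrArg₂ _ ?_ (congrArg₂ _ ?_ ?_))))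
  · exact rangeFilterMap x.length _ _ _ _
      (fun k hk => decide_eq_decide.mpr (by rw [modcast]; omega)) hgx
  · exact rangeFilterMap x.length _ _ _ _
      (fun k hk => decide_eq_decide.mpr (by rw [modcast]; omega)) hgy
  · exact rangeFilterMap x.length _ _ _ _
      (fun k hk => decide_eq_decide.mpr (by rw [modcast]; omega)) hgx
  · exact rangeFilterMap x.length _ _ _ _
      (fun k hk => decide_eq_decide.mpr (by rw [modcast]; omega)) hgy
  · exact rangeFilterMap x.length _ _ _ _
      (fun k hk => decide_eq_decide.mpr (by rw [modcast]; omega)) hgx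
  · exact rangeFilterMap x.length _ _ _ _
      (fun k hk => decide_eq_decide.mpr (by rw [modcast]; omega)) hgy

theorem B_eq (x : List (List Int)) (y : List Int) :
    make_samples_alt x y =
      (((List.range x.length).filter (fun k => decide (k % 10 < 8))).map (fun k => x.getD k []),
       ((List.range x.length).filter (fun k => decide (k % 10 < 8))).map (fun k => y.getD k 0),
       ((List.range x.length).filter (fun k => decide (k % 10 = 8))).map (fun k => x.getD k []),
       ((List.range x.length).filter (fun k => decide (k % 10 = 8))).map (fun k => y.getD k 0),
       ((List.range x.length).filter (fun k => decide (k % 10 = 9))).map (fun k => x.getD k []),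
       ((List.range x.length).filter (fun k => decide (k % 10 = 9))).map (fun k => y.getD k 0)) := by
  unfold make_samples_alt
  rw [PySem.List.len_eq]
  have hgx : ∀ k, k < x.length → (fun i => PySem.List.pyGetD x i []) (k : Int) = (fun k => x.getD k []) k := by
    intro k _; simp [PySem.List.pyGetD_natCast]
  have hgy : ∀ k, k < x.length → (fun i => PySem.List.pyGetD y i 0) (k : Int) = (fun k => y.getD k 0) k := by
    intro k _; simp [PySem.List.pyGetD_natCast]
  have h8 : ((8 : Nat) : Int) = (8 : Int) := by norm_num
  have h9 : ((9 : Nat) : Int) = (9 : Int) := by norm_num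
  refine congrArg₂ _ ?_ (congrArg₂ _ ?_ (congrArg₂ _ ?_ (congrArg₂ _ ?_ (congrArg₂ _ ?_ ?_))))
  · exact rangeFilterMap x.length _ _ _ _
      (fun k hk => decide_eq_decide.mpr (by rw [modcast]; omega)) hgx
  · exact rangeFilterMap x.length _ _ _ _
      (fun k hk => decide_eq_decide.mpr (by rw [modcast]; omega)) hgy
  · rw [← h8]; exact strideSel x.length 8 (by omega) _ _ hgx
  · rw [← h8]; exact strideSel x.length 8 (by omega) _ _ hgy
  · rw [← h9]; exact strideSel x.length 9 (by omega) _ _ hgx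
  · rw [← h9]; exact strideSel x.length 9 (by omega) _ _ hgy

-- ===== VERDICT (by name: the statement is the Claim_ definition above) =====
theorem make_samples_spec : Claim_equal_make_samples := by
  intro x y _ _
  unfold Spec_make_samples
  rw [A_eq x y, B_eq x y]
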